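-- pv_equiv track=rewrite | github.com/YXWisaboy/MYPYTHON | code/knowledgediscoveryofTCM/src/FFP-grow-tree/predata.py | group_matix
-- ===== SOURCE A (Python) =====
-- def group_matix(a):
--     b=[]
--     for i in a:
--         if len(b)==0:
--             b.append(i[1:])
--         else:
--             flat=0
--             for j in b:
--                 if j[0:2]==i[1:3]:
--                     j[2]+=i[3]
--                     flat=1
--             if flat==0:
--                 b.append(i[1:])
--     return b
-- ===== SOURCE B (Python) =====
-- def group_matix(a):
--     # Two staged passes with deferred summation: pass 1 records each key's first
--     # row tail and separately accumulates later rows' column-3 values per key;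
--     # pass 2 emits the groups, folding the deferred sum into slot 2.
--     order, first, extra = [], {}, {}
--     for i in a:
--         k = tuple(i[1:3])
--         if k in first:
--             extra[k] = extra.get(k, 0) + i[3]
--         else:
--             order.append(k)
--             first[k] = i[1:]
--     out = []
--     for k in order:
--         row = first[k]
--         if k in extra:
--             row[2] += extra[k]
--         out.append(row)
--     return out
-- ===== Notes on version B (the rewrite author's own statement) =====
-- stated objective: faster
-- what changed: Replaces A's interleaved scan-and-mutate (for each row, rescan and update the whole group list) with two staged passes: a first pass recording each key's first row and a deferred per-key sum of later rows' column 3 in dicts, then a separate emission pass that folds each deferred sum into slot 2 once.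
import Mathlib
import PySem

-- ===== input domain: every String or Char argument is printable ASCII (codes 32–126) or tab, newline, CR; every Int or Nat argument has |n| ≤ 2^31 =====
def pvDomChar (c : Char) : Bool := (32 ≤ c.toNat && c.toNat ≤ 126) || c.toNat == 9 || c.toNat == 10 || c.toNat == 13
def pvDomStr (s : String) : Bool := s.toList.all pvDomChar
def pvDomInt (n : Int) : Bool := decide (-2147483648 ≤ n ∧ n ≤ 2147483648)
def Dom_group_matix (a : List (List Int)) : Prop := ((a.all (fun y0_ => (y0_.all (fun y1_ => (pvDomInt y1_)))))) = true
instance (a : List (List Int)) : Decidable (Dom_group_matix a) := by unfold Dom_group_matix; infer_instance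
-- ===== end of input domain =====

-- B replaces A's interleaved scan-and-mutate by two staged passes: pass 1 records each
-- key's first row and a deferred per-key sum of later rows' column 3; pass 2 emits the
-- groups, folding the deferred sum in once (objective: faster, no rescan per row).

-- ===== PORT A =====
-- j[2] += i[3]: both reads via pyGet? (none = IndexError, excluded by Pre_; the
-- fallback 'j' is unreachable under Pre_ and only makes the port total).
def pvUpdA (i j : List Int) : List Int :=
  match PySem.List.pyGet? j 2, PySem.List.pyGet? i 3 with
  | some x, some y => j.set 2 (x + y)
  | _, _ => j

-- the body of A's outer loop; the inner 'for j in b' checks j[0:2]==i[1:3] and mutates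
-- only j[2] of each matching j, so it is exactly: update every matching j (map) and
-- record in flat whether any matched (any).  Slices ported with PySem.List.slice.
def pvStepA (b : List (List Int)) (i : List Int) : List (List Int) :=
  if b.length = 0 then b ++ [PySem.List.slice i (some 1) none]
  else
    let b' := b.map (fun j =>
      if PySem.List.slice j (some 0) (some 2) = PySem.List.slice i (some 1) (some 3)
      then pvUpdA i j else j)
    if b.any (fun j =>
        PySem.List.slice j (some 0) (some 2) = PySem.List.slice i (some 1) (some 3))
    then b' else b' ++ [PySem.List.slice i (some 1) none]

def group_matix (a : List (List Int)) : List (List Int) :=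
  a.foldl pvStepA []

-- ===== PORT B =====
-- pass-1 state: (order of first occurrence of keys, first : key ↦ first row's i[1:],
-- extra : key ↦ deferred sum of later rows' i[3]).  i[3] read via pyGet? (none =
-- IndexError in Python, outside Pre_; the port then leaves the state unchanged).
def pvPass1 (st : List (List Int) × PySem.Dict (List Int) (List Int) × PySem.Dict (List Int) Int)
    (i : List Int) :
    List (List Int) × PySem.Dict (List Int) (List Int) × PySem.Dict (List Int) Int :=
  let k := PySem.List.slice i (some 1) (some 3)
  if st.2.1.contains k then
    match PySem.List.pyGet? i 3 with
    | some y => (st.1, st.2.1, st.2.2.insert k (st.2.2.getD k 0 + y))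
    | none => st
  else (st.1 ++ [k], st.2.1.insert k (PySem.List.slice i (some 1) none), st.2.2)

-- pass 2 body: row = first[k]; if k in extra: row[2] += extra[k].  row[2] via pyGet?
-- (none = IndexError, outside Pre_; the port then emits the row unchanged).
def pvEmit (first : PySem.Dict (List Int) (List Int)) (extra : PySem.Dict (List Int) Int)
    (k : List Int) : List Int :=
  let row := first.getD k []
  match extra.get? k, PySem.List.pyGet? row 2 with
  | some e, some x => row.set 2 (x + e)
  | _, _ => row

def group_matix_alt (a : List (List Int)) : List (List Int) :=
  let st := a.foldl pvPass1 ([], PySem.Dict.empty, PySem.Dict.empty)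
  st.1.map (pvEmit st.2.1 st.2.2)

-- ===== PRECONDITION & SPEC =====
-- Pre_ excludes exactly the inputs where the Python A raises IndexError: two rows with
-- the same key row[1:3] one of which is shorter than 4 (then j[2] or i[3] is out of
-- range).  B raises there too; the ports agree even outside Pre_.
def Pre_group_matix (a : List (List Int)) : Prop :=
  a.Pairwise (fun r s =>
    PySem.List.slice r (some 1) (some 3) = PySem.List.slice s (some 1) (some 3) →
    4 ≤ r.length ∧ 4 ≤ s.length)
instance (a : List (List Int)) : Decidable (Pre_group_matix a) := by
  unfold Pre_group_matix; infer_instance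

def pvWitness_group_matix : List (List Int) := [[1, 2, 3, 4], [9, 2, 3, 5], [0, 7, 8, 1, 99]]

def Spec_group_matix (a : List (List Int)) (out : List (List Int)) : Prop := out = group_matix_alt a
instance (a : List (List Int)) (out : List (List Int)) : Decidable (Spec_group_matix a out) := by unfold Spec_group_matix; infer_instance

-- ===== CLAIM (what is proved, stated in full; the proofs are below) =====
def Claim_equal_group_matix : Prop := ∀ (a : List (List Int)), Dom_group_matix a → Pre_group_matix a → Spec_group_matix a (group_matix a)

-- ===== LEMMAS AND PROOFS =====

-- the key of a group row j (= j[0:2]; rows only ever change at index 2, so it is stable)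
def pvKey (j : List Int) : List Int := j.take 2

lemma pvSlice02 (j : List Int) : PySem.List.slice j (some 0) (some 2) = j.take 2 := by
  simp [pysem]

lemma pvSlice13 (i : List Int) : PySem.List.slice i (some 1) (some 3) = (i.drop 1).take 2 := by
  simp [pysem]

lemma pvSlice1none (i : List Int) : PySem.List.slice i (some 1) none = i.drop 1 := by
  simp [pysem]

lemma pvKey_set2 (l : List Int) (x : Int) : pvKey (l.set 2 x) = pvKey l := by
  match l with
  | [] => rfl
  | [a] => rfl
  | a :: b :: t => simp [pvKey, List.set, List.take]

-- the invariant tying B's pass-1 state to A's group list b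
def pvInv (order : List (List Int)) (first : PySem.Dict (List Int) (List Int))
    (extra : PySem.Dict (List Int) Int) (b : List (List Int)) : Prop :=
  b = order.map (pvEmit first extra) ∧
  order.Nodup ∧
  first.keys = order ∧
  (∀ k r, first.get? k = some r → r.take 2 = k) ∧
  (∀ k, (extra.get? k).isSome → k ∈ order)

lemma pvKey_emit (first : PySem.Dict (List Int) (List Int)) (extra : PySem.Dict (List Int) Int)
    (k r : List Int) (h : first.get? k = some r) (hk : r.take 2 = k) :
    pvKey (pvEmit first extra k) = k := by
  unfold pvEmit
  simp only [PySem.Dict.getD_of_get?_eq_some first [] h]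
  cases extra.get? k <;> cases PySem.List.pyGet? r 2 <;>
    simp only [pvKey_set2] <;> exact hk

lemma pvEmit_extra_ne (first : PySem.Dict (List Int) (List Int))
    (extra : PySem.Dict (List Int) Int) (k k' : List Int) (v : Int) (h : k' ≠ k) :
    pvEmit first (extra.insert k v) k' = pvEmit first extra k' := by
  unfold pvEmit
  rw [PySem.Dict.get?_insert_of_ne extra v h]

lemma pvEmit_first_ne (first : PySem.Dict (List Int) (List Int))
    (extra : PySem.Dict (List Int) Int) (k k' : List Int) (v : List Int) (h : k' ≠ k) :
    pvEmit (first.insert k v) extra k' = pvEmit first extra k' := by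
  unfold pvEmit
  rw [PySem.Dict.getD_insert_of_ne (d := first) (v := v) (d0 := []) h]

lemma pvUpd_emit (i : List Int) (first : PySem.Dict (List Int) (List Int))
    (extra : PySem.Dict (List Int) Int) (k r : List Int) (y : Int)
    (hr : first.get? k = some r) (hy : PySem.List.pyGet? i 3 = some y) :
    pvUpdA i (pvEmit first extra k) = pvEmit first (extra.insert k (extra.getD k 0 + y)) k := by
  have hget2 : PySem.List.pyGet? r 2 = r[2]? := PySem.List.pyGet?_natCast r 2
  unfold pvEmit pvUpdA
  simp only [PySem.Dict.getD_of_get?_eq_some first [] hr, PySem.Dict.get?_insert_self,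
    PySem.Dict.getD_eq_get?_getD, hget2, hy]
  cases he : extra.get? k with
  | none =>
      cases hx : r[2]? with
      | none => simp [hget2, hx]
      | some x => simp [hget2, hx]
  | some e =>
      cases hx : r[2]? with
      | none => simp [hget2, hx]
      | some x =>
          have hlen : 2 < r.length := (List.getElem?_eq_some_iff.mp hx).1
          have hset : PySem.List.pyGet? (r.set 2 (x + e)) 2 = some (x + e) := by
            rw [show PySem.List.pyGet? (r.set 2 (x + e)) 2 = (r.set 2 (x + e))[2]? from
              PySem.List.pyGet?_natCast _ 2]
            exact List.getElem?_set_self (by simpa using hlen)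
          simp only [hset, Option.getD_some, List.set_set]
          congr 1
          ring

-- every key in order has a stored first row whose take-2 is itself
lemma pvRow_of_mem (first : PySem.Dict (List Int) (List Int)) (order : List (List Int))
    (hkeys : first.keys = order)
    (htake : ∀ k r, first.get? k = some r → r.take 2 = k)
    (k : List Int) (hk : k ∈ order) :
    ∃ r, first.get? k = some r ∧ r.take 2 = k := by
  cases hg : first.get? k with
  | none =>
      exact absurd ((PySem.Dict.get?_eq_none_iff_not_mem_keys first k).mp hg)
        (by rw [hkeys]; exact fun h => h hk)
  | some r => exact ⟨r, rfl, htake k r hg⟩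

lemma pvStep_eq (order : List (List Int)) (first : PySem.Dict (List Int) (List Int))
    (extra : PySem.Dict (List Int) Int) (b : List (List Int)) (i : List Int)
    (h : pvInv order first extra b) :
    pvStepA b i = ((pvPass1 (order, first, extra) i).1).map
        (pvEmit (pvPass1 (order, first, extra) i).2.1 (pvPass1 (order, first, extra) i).2.2) ∧
    pvInv (pvPass1 (order, first, extra) i).1 (pvPass1 (order, first, extra) i).2.1
        (pvPass1 (order, first, extra) i).2.2
        ((pvPass1 (order, first, extra) i).1.map
          (pvEmit (pvPass1 (order, first, extra) i).2.1 (pvPass1 (order, first, extra) i).2.2)) := by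
  obtain ⟨hb, hnd, hkeys, htake, hextra⟩ := h
  set k := PySem.List.slice i (some 1) (some 3) with hkdef
  have hkey_emit : ∀ k' ∈ order, (pvEmit first extra k').take 2 = k' := by
    intro k' hk'
    obtain ⟨r, hr, hrt⟩ := pvRow_of_mem first order hkeys htake k' hk'
    exact pvKey_emit first extra k' r hr hrt
  by_cases hc : first.contains k = true
  · -- duplicate key: k ∈ order
    have hmemk : k ∈ order := by
      rw [← hkeys]; exact (PySem.Dict.contains_iff_mem_keys first k).mp hc
    obtain ⟨r, hr, hrt⟩ := pvRow_of_mem first order hkeys htake k hmemk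
    have hblen : b.length ≠ 0 := by
      rw [hb]; simp only [List.length_map]
      exact fun hzero => by simp [List.length_eq_zero_iff.mp hzero] at hmemk
    have hany : b.any (fun j =>
        PySem.List.slice j (some 0) (some 2) = PySem.List.slice i (some 1) (some 3)) = true := by
      rw [hb, List.any_map, List.any_eq_true]
      refine ⟨k, hmemk, ?_⟩
      simp only [Function.comp_apply, decide_eq_true_eq, pvSlice02]
      rw [hkey_emit k hmemk]
    have hstepA : pvStepA b i = order.map (fun k' =>
        if k' = k then pvUpdA i (pvEmit first extra k') else pvEmit first extra k') := by
      unfold pvStepA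
      rw [if_neg hblen, if_pos hany, hb, List.map_map]
      apply List.map_congr_left
      intro k' hk'
      simp only [Function.comp_apply, pvSlice02]
      rw [hkey_emit k' hk', ← hkdef]
    cases hy : PySem.List.pyGet? i 3 with
    | none =>
        -- Python would raise here (outside Pre_); both ports leave everything unchanged
        have hp : pvPass1 (order, first, extra) i = (order, first, extra) := by
          unfold pvPass1
          simp only [← hkdef]
          rw [if_pos hc, hy]
        rw [hp]
        constructor
        · rw [hstepA]
          apply List.map_congr_left
          intro k' hk'
          split_ifs with he
          · rw [he]
            unfold pvUpdA
            rw [hy]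
            cases PySem.List.pyGet? (pvEmit first extra k) 2 <;> rfl
          · rfl
        · exact ⟨rfl, hnd, hkeys, htake, hextra⟩
    | some y =>
        have hp : pvPass1 (order, first, extra) i =
            (order, first, extra.insert k (extra.getD k 0 + y)) := by
          unfold pvPass1
          simp only [← hkdef]
          rw [if_pos hc, hy]
        rw [hp]
        constructor
        · rw [hstepA]
          apply List.map_congr_left
          intro k' hk'
          split_ifs with he
          · rw [he]
            exact pvUpd_emit i first extra k r y hr hy
          · exact (pvEmit_extra_ne first extra k k' _ he).symm
        · refine ⟨rfl, hnd, hkeys, htake, ?_⟩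
          intro k'' hk''
          by_cases hkk : k'' = k
          · exact hkk ▸ hmemk
          · rw [PySem.Dict.get?_insert_of_ne extra _ hkk] at hk''
            exact hextra k'' hk''
  · -- fresh key: k ∉ order, A appends i[1:], B records it
    have hnotmem : k ∉ order := by
      rw [← hkeys]
      exact fun hmem => hc ((PySem.Dict.contains_iff_mem_keys first k).mpr hmem)
    have hnomatch : ∀ j ∈ b, ¬ (PySem.List.slice j (some 0) (some 2) =
        PySem.List.slice i (some 1) (some 3)) := by
      rw [hb]
      intro j hj
      obtain ⟨k', hk', hjk⟩ := List.mem_map.mp hj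
      rw [← hjk, pvSlice02, hkey_emit k' hk', ← hkdef]
      exact fun hEq => hnotmem (hEq ▸ hk')
    have hany : b.any (fun j =>
        PySem.List.slice j (some 0) (some 2) = PySem.List.slice i (some 1) (some 3)) = false := by
      rw [List.any_eq_false]
      intro j hj
      simpa using hnomatch j hj
    have hstepA : pvStepA b i = b ++ [PySem.List.slice i (some 1) none] := by
      unfold pvStepA
      by_cases hz : b.length = 0
      · rw [if_pos hz]
      · rw [if_neg hz, if_neg (by rw [hany]; exact Bool.false_ne_true)]
        congr 1
        conv_lhs => rw [List.map_congr_left (fun j hj => if_neg (hnomatch j hj))]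
        exact List.map_id b
    have hextra_none : extra.get? k = none := by
      cases hg : extra.get? k with
      | none => rfl
      | some v => exact absurd (hextra k (by rw [hg]; rfl)) hnotmem
    have hemit_new : pvEmit (first.insert k (PySem.List.slice i (some 1) none)) extra k =
        PySem.List.slice i (some 1) none := by
      unfold pvEmit
      rw [PySem.Dict.getD_insert_self, hextra_none]
    have hmap_new : (order ++ [k]).map
        (pvEmit (first.insert k (PySem.List.slice i (some 1) none)) extra) =
        b ++ [PySem.List.slice i (some 1) none] := by
      rw [List.map_append, List.map_cons, List.map_nil, hemit_new, hb]
      congr 1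
      apply List.map_congr_left
      intro k' hk'
      exact pvEmit_first_ne first extra k k' _ (fun hEq => hnotmem (hEq ▸ hk'))
    have hp : pvPass1 (order, first, extra) i =
        (order ++ [k], first.insert k (PySem.List.slice i (some 1) none), extra) := by
      unfold pvPass1
      simp only [← hkdef]
      rw [if_neg hc]
    rw [hp]
    constructor
    · rw [hstepA, ← hmap_new]
    · refine ⟨rfl, ?_, ?_, ?_, ?_⟩
      · exact List.Nodup.append hnd (List.nodup_singleton k)
          (by simpa using hnotmem)
      · rw [PySem.Dict.keys_insert_of_not_contains first _ (by simpa using hc), hkeys]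
      · intro k'' r'' hg
        by_cases hkk : k'' = k
        · subst hkk
          rw [PySem.Dict.get?_insert_self] at hg
          cases hg
          rw [pvSlice1none, hkdef, pvSlice13]
        · rw [PySem.Dict.get?_insert_of_ne first _ hkk] at hg
          exact htake k'' r'' hg
      · intro k'' hk''
        exact List.mem_append_left _ (hextra k'' hk'')

lemma pvFold_eq (a : List (List Int)) :
    ∀ (order : List (List Int)) (first : PySem.Dict (List Int) (List Int))
      (extra : PySem.Dict (List Int) Int) (b : List (List Int)), pvInv order first extra b →
      a.foldl pvStepA b = ((a.foldl pvPass1 (order, first, extra)).1).map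
        (pvEmit (a.foldl pvPass1 (order, first, extra)).2.1 (a.foldl pvPass1 (order, first, extra)).2.2) := by
  induction a with
  | nil => intro order first extra b h; simpa using h.1
  | cons i rest ih =>
      intro order first extra b h
      obtain ⟨heq, hinv⟩ := pvStep_eq order first extra b i h
      simp only [List.foldl_cons]
      have hst : pvPass1 (order, first, extra) i =
          ((pvPass1 (order, first, extra) i).1, (pvPass1 (order, first, extra) i).2.1,
           (pvPass1 (order, first, extra) i).2.2) := rfl
      rw [heq, hst]
      exact ih _ _ _ _ hinv

-- ===== VERDICT (by name: the statement is the Claim_ definition above) =====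
theorem group_matix_spec : Claim_equal_group_matix := by
  intro a _ _
  unfold Spec_group_matix group_matix group_matix_alt
  exact pvFold_eq a [] PySem.Dict.empty PySem.Dict.empty []
    ⟨rfl, List.nodup_nil, rfl, by intro k r h; simp [PySem.Dict.get?_empty] at h,
     by intro k h; simp [PySem.Dict.get?_empty] at h⟩
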